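-- pv_equiv track=rewrite | github.com/FlyingFaller/WeekendWordleBot | helpers.py | pattern_str_to_int
-- ===== SOURCE A (Python) =====
-- GREEN = 2
--
-- YELLOW = 1
--
-- GRAY = 0
--
-- def pattern_str_to_int(pattern: str) -> int:
--     pattern_list = []
--     for c in pattern.upper():
--         match c:
--             case "G": pattern_list.append(GREEN)
--             case "Y": pattern_list.append(YELLOW)
--             case _: pattern_list.append(GRAY)
--
--     return pattern_to_int(pattern_list)
--
-- def pattern_to_int(pattern: list[int]) -> int:
--     """Converts a pattern list represeting a wordle pattern to a unique int"""
--     ret_int = 0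
--     for i in range(5):
--         ret_int += (3**i)*pattern[i]
--     return ret_int
-- ===== SOURCE B (Python) =====
-- def pattern_str_to_int(pattern: str) -> int:
--     p = pattern.upper()
--     digits = ''.join('2' if p[i] == 'G' else '1' if p[i] == 'Y' else '0'
--                      for i in (4, 3, 2, 1, 0))
--     return int(digits, 3)
-- ===== Notes on version B (the rewrite author's own statement) =====
-- stated objective: alternative
-- what changed: A builds an int digit list over the entire string and then sums 3**i*pattern[i]; B does no arithmetic itself: it builds the 5-character base-3 numeral string (most-significant digit first, indexing p[4]..p[0] directly) and parses it with int(digits, 3), so only five characters are converted regardless of input length.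
import Mathlib
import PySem

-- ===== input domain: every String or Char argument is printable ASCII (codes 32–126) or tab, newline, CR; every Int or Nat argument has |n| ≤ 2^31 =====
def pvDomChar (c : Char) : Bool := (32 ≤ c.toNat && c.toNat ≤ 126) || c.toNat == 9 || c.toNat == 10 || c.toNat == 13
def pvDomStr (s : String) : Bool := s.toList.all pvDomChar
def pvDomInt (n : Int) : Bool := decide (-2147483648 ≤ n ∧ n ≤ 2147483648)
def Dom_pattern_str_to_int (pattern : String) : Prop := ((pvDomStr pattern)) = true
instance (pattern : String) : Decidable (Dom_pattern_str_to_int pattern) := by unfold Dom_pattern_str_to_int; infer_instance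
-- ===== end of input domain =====

-- B replaces A's two arithmetic passes (digit list, then sum of 3^i * digit) by building the
-- five-character base-3 numeral string and parsing it with int(_, 3); objective: alternative.

-- ===== PORT A =====
-- A's first loop: append GREEN/YELLOW/GRAY for each char of pattern.upper()
def pattern_str_to_int_list (pattern : String) : List Int :=
  (PySem.Str.upper pattern).toList.foldl
    (fun acc c =>
      if c = 'G' then acc ++ [(2 : Int)]
      else if c = 'Y' then acc ++ [(1 : Int)]
      else acc ++ [(0 : Int)]) []

-- helper pattern_to_int: ret += (3**i) * pattern[i] for i in range(5); pattern[i] raises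
-- IndexError when i is out of range — those inputs are excluded by Pre_ (pyGetD default unused there)
def pattern_to_int (pattern : List Int) : Int :=
  (PySem.List.pyRange 0 5 1).foldl
    (fun ret i => ret + 3 ^ i.toNat * PySem.List.pyGetD pattern i 0) 0

def pattern_str_to_int (pattern : String) : Int :=
  pattern_to_int (pattern_str_to_int_list pattern)

-- ===== PORT B =====
-- hand port of int(digits, 3): exact for the nonempty strings of digit chars '0'..'2'
-- (the only strings B ever passes it)
def pvParseBase3 (s : List Char) : Int :=
  s.foldl (fun acc c => acc * 3 + ((c.toNat : Int) - 48)) 0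

def pattern_str_to_int_alt (pattern : String) : Int :=
  let p := (PySem.Str.upper pattern).toList
  -- ''.join(... for i in (4,3,2,1,0)); p[i] raises IndexError when short (excluded by Pre_)
  let digits := ([4, 3, 2, 1, 0] : List Int).map (fun i =>
    let c := PySem.List.pyGetD p i ' '
    if c = 'G' then '2' else if c = 'Y' then '1' else '0')
  pvParseBase3 digits

-- ===== PRECONDITION & SPEC =====
-- Both A and B raise IndexError when the pattern has fewer than 5 characters.
def Pre_pattern_str_to_int (pattern : String) : Prop := 5 ≤ pattern.toList.length
instance (pattern : String) : Decidable (Pre_pattern_str_to_int pattern) := by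
  unfold Pre_pattern_str_to_int; infer_instance
def pvWitness_pattern_str_to_int : String := "GYBXY"

def Spec_pattern_str_to_int (pattern : String) (out : Int) : Prop := out = pattern_str_to_int_alt pattern
instance (pattern : String) (out : Int) : Decidable (Spec_pattern_str_to_int pattern out) := by
  unfold Spec_pattern_str_to_int; infer_instance

-- ===== CLAIM (what is proved, stated in full; the proofs are below) =====
def Claim_equal_pattern_str_to_int : Prop := ∀ (pattern : String), Dom_pattern_str_to_int pattern → Pre_pattern_str_to_int pattern → Spec_pattern_str_to_int pattern (pattern_str_to_int pattern)

-- ===== LEMMAS AND PROOFS =====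

-- A's list-building loop is a map of the per-character digit function.
def pvDigit (c : Char) : Int := if c = 'G' then 2 else if c = 'Y' then 1 else 0

theorem pattern_str_to_int_list_eq_map (pattern : String) :
    pattern_str_to_int_list pattern = ((PySem.Str.upper pattern).toList).map pvDigit := by
  unfold pattern_str_to_int_list
  rw [show (fun (acc : List Int) (c : Char) =>
      if c = 'G' then acc ++ [(2 : Int)]
      else if c = 'Y' then acc ++ [(1 : Int)]
      else acc ++ [(0 : Int)]) = fun acc c => acc ++ [pvDigit c] by
    funext acc c; unfold pvDigit; split_ifs <;> rfl]
  simpa using PySem.List.foldl_append_singleton_eq_map pvDigit (PySem.Str.upper pattern).toList []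

-- xs[i] on a list with at least five elements, for the literal indices 0..4.
theorem pvGet0 {α : Type} (x0 x1 x2 x3 x4 : α) (r : List α) (d : α) :
    PySem.List.pyGetD (x0::x1::x2::x3::x4::r) 0 d = x0 := by
  rw [show (0:Int) = ((0:Nat):Int) from rfl, PySem.List.pyGetD_natCast]; rfl
theorem pvGet1 {α : Type} (x0 x1 x2 x3 x4 : α) (r : List α) (d : α) :
    PySem.List.pyGetD (x0::x1::x2::x3::x4::r) 1 d = x1 := by
  rw [show (1:Int) = ((1:Nat):Int) from rfl, PySem.List.pyGetD_natCast]; rfl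
theorem pvGet2 {α : Type} (x0 x1 x2 x3 x4 : α) (r : List α) (d : α) :
    PySem.List.pyGetD (x0::x1::x2::x3::x4::r) 2 d = x2 := by
  rw [show (2:Int) = ((2:Nat):Int) from rfl, PySem.List.pyGetD_natCast]; rfl
theorem pvGet3 {α : Type} (x0 x1 x2 x3 x4 : α) (r : List α) (d : α) :
    PySem.List.pyGetD (x0::x1::x2::x3::x4::r) 3 d = x3 := by
  rw [show (3:Int) = ((3:Nat):Int) from rfl, PySem.List.pyGetD_natCast]; rfl
theorem pvGet4 {α : Type} (x0 x1 x2 x3 x4 : α) (r : List α) (d : α) :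
    PySem.List.pyGetD (x0::x1::x2::x3::x4::r) 4 d = x4 := by
  rw [show (4:Int) = ((4:Nat):Int) from rfl, PySem.List.pyGetD_natCast]; rfl

-- B's digit-character-then-parse step computes the same per-character digit value.
theorem pvDigitChar_val (c : Char) :
    (((if c = 'G' then '2' else if c = 'Y' then '1' else '0').toNat : Int) - 48) = pvDigit c := by
  unfold pvDigit; split_ifs <;> rfl

theorem pattern_str_to_int_agree (pattern : String)
    (h : 5 ≤ pattern.toList.length) :
    pattern_str_to_int pattern = pattern_str_to_int_alt pattern := by
  have hup : (PySem.Str.upper pattern).toList = PySem.Chars.upper pattern.toList := by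
    simp [pysem]
  have hl : 5 ≤ (PySem.Str.upper pattern).toList.length := by
    rw [hup]; simpa [PySem.Chars.upper] using h
  obtain ⟨c0, c1, c2, c3, c4, rest, hcs⟩ :
      ∃ c0 c1 c2 c3 c4 rest,
        (PySem.Str.upper pattern).toList = c0 :: c1 :: c2 :: c3 :: c4 :: rest := by
    match hx : (PySem.Str.upper pattern).toList, hl with
    | c0 :: c1 :: c2 :: c3 :: c4 :: rest, _ =>
      exact ⟨c0, c1, c2, c3, c4, rest, rfl⟩
  unfold pattern_str_to_int pattern_to_int pattern_str_to_int_alt pvParseBase3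
  rw [pattern_str_to_int_list_eq_map, hcs]
  rw [show PySem.List.pyRange 0 5 1 = [0, 1, 2, 3, 4] from rfl]
  simp only [List.foldl, List.map, pvGet0, pvGet1, pvGet2, pvGet3, pvGet4, pvDigitChar_val,
    show Int.toNat 0 = 0 from rfl, show Int.toNat 1 = 1 from rfl, show Int.toNat 2 = 2 from rfl,
    show Int.toNat 3 = 3 from rfl, show Int.toNat 4 = 4 from rfl]
  ring

-- ===== VERDICT (by name: the statement is the Claim_ definition above) =====
theorem pattern_str_to_int_spec : Claim_equal_pattern_str_to_int := by
  intro pattern _ hpre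
  unfold Pre_pattern_str_to_int at hpre
  unfold Spec_pattern_str_to_int
  exact pattern_str_to_int_agree pattern hpre
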